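-- pv_equiv track=rewrite | github.com/admk/sembr | sembr/process.py | _process_modes
-- ===== SOURCE A (Python) =====
-- def _process_modes(lines):
--     new_lines = []
--     modes = []
--     prev_status = 'start'
--     for line in lines:
--         if line.startswith('%'):
--             status = 'comment'
--         elif line.endswith('%'):
--             status = 'percent'
--             line = line.rstrip('%')
--         else:
--             status = 'normal'
--         match (prev_status, status):
--             case ('start', _):
--                 pass
--             case ('normal', _):
--                 modes.append('space')
--             case ('percent', _):
--                 modes.append('nospace')
--             case ('comment', 'normal'):
--                 modes.append('break')
--             case ('comment', 'percent'):
--                 modes.append('break')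
--             case ('comment', 'comment'):
--                 modes.append('comment')
--             case (_, 'comment'):
--                 modes.append('comment')
--             case _:
--                 raise ValueError(
--                     'Unknown status transition: '
--                     f'{prev_status} -> {status}.')
--         new_lines.append(line)
--         prev_status = status
--     # last transition always force a break
--     modes.append('break')
--     return new_lines, modes
-- ===== SOURCE B (Python) =====
-- def _classify(line):
--     """Return (possibly '%'-stripped line, status) for one line."""
--     if line.startswith('%'):
--         return line, 'comment'
--     if line.endswith('%'):
--         return line.rstrip('%'), 'percent'
--     return line, 'normal'
--
--
-- def _transition(prev, status):
--     """Mode for one consecutive status pair (same precedence as A's match)."""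
--     if prev == 'normal':
--         return 'space'
--     if prev == 'percent':
--         return 'nospace'
--     # prev == 'comment'
--     return 'comment' if status == 'comment' else 'break'
--
--
-- def _process_modes(lines):
--     pairs = [_classify(line) for line in lines]
--     new_lines = [p[0] for p in pairs]
--     statuses = [p[1] for p in pairs]
--     modes = [_transition(p, s) for p, s in zip(statuses, statuses[1:])]
--     modes.append('break')
--     return new_lines, modes
-- ===== Notes on version B (the rewrite author's own statement) =====
-- stated objective: alternative
-- what changed: B replaces A's single stateful loop (prev_status threaded through a match) by two independent passes: one pass classifying every line, then a pairwise zip over consecutive statuses to derive the modes; the 'start' state disappears because the first line has no preceding pair.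
import Mathlib
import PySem

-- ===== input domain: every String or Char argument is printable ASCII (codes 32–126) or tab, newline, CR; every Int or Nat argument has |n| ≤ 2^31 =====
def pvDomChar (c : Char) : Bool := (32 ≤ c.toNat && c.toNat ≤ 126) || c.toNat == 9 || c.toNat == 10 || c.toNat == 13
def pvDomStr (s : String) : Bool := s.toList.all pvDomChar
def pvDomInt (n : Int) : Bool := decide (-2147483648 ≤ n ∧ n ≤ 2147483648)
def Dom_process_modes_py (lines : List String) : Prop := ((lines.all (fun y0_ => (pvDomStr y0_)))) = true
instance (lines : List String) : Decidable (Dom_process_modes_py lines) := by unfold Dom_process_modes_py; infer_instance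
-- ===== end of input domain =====

-- B replaces A's single stateful loop by a classify pass plus a pairwise zip over
-- consecutive statuses (objective: alternative decomposition, same cost).

-- line.rstrip('%'): drop the trailing run of '%' characters (exact on all strings:
-- hand port of str.rstrip with a one-character strip set).
def pvRstripPct (s : String) : String :=
  String.ofList ((s.toList.reverse.dropWhile (fun c => c == '%')).reverse)

-- ===== PORT A =====
-- A's for loop as structural recursion over the same state (new_lines, modes, prev_status);
-- A's final `case _: raise ValueError` is unreachable (prev_status is always one of the
-- four literals below), ported as returning modes unchanged.
def pvLoopA : List String → List String → List String → String → List String × List String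
  | [], new_lines, modes, _ => (new_lines, modes ++ ["break"])
  | line :: rest, new_lines, modes, prev_status =>
    let ls : String × String :=
      if PySem.Str.startswith line "%" then (line, "comment")
      else if PySem.Str.endswith line "%" then (pvRstripPct line, "percent")
      else (line, "normal")
    let modes :=
      if prev_status = "start" then modes
      else if prev_status = "normal" then modes ++ ["space"]
      else if prev_status = "percent" then modes ++ ["nospace"]
      else if prev_status = "comment" ∧ ls.2 = "normal" then modes ++ ["break"]
      else if prev_status = "comment" ∧ ls.2 = "percent" then modes ++ ["break"]
      else if prev_status = "comment" ∧ ls.2 = "comment" then modes ++ ["comment"]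
      else if ls.2 = "comment" then modes ++ ["comment"]
      else modes  -- unreachable `raise ValueError` arm
    pvLoopA rest (new_lines ++ [ls.1]) modes ls.2

def process_modes_py (lines : List String) : List String × List String :=
  pvLoopA lines [] [] "start"

-- ===== PORT B =====
def pvClassify (line : String) : String × String :=
  if PySem.Str.startswith line "%" then (line, "comment")
  else if PySem.Str.endswith line "%" then (pvRstripPct line, "percent")
  else (line, "normal")

def pvTransition (prev status : String) : String :=
  if prev = "normal" then "space"
  else if prev = "percent" then "nospace"
  else if status = "comment" then "comment" else "break"

def process_modes_py_alt (lines : List String) : List String × List String :=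
  let pairs := lines.map pvClassify
  let new_lines := pairs.map Prod.fst
  let statuses := pairs.map Prod.snd
  let modes := (statuses.zip statuses.tail).map (fun p => pvTransition p.1 p.2) ++ ["break"]
  (new_lines, modes)

-- ===== PRECONDITION & SPEC =====
def Spec_process_modes_py (lines : List String) (out : List String × List String) : Prop := out = process_modes_py_alt lines
instance (lines : List String) (out : List String × List String) : Decidable (Spec_process_modes_py lines out) := by unfold Spec_process_modes_py; infer_instance

-- ===== CLAIM (what is proved, stated in full; the proofs are below) =====
def Claim_equal_process_modes_py : Prop := ∀ (lines : List String), Dom_process_modes_py lines → Spec_process_modes_py lines (process_modes_py lines)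

-- ===== LEMMAS AND PROOFS =====

lemma pvClassify_snd (line : String) :
    (pvClassify line).2 = "comment" ∨ (pvClassify line).2 = "percent" ∨ (pvClassify line).2 = "normal" := by
  unfold pvClassify; split_ifs <;> simp

-- A's match arm, for a reachable prev_status, equals B's transition function.
lemma pvMatch_eq_transition (prev status : String)
    (hp : prev = "comment" ∨ prev = "percent" ∨ prev = "normal")
    (hs : status = "comment" ∨ status = "percent" ∨ status = "normal") (modes : List String) :
    (if prev = "start" then modes
      else if prev = "normal" then modes ++ ["space"]
      else if prev = "percent" then modes ++ ["nospace"]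
      else if prev = "comment" ∧ status = "normal" then modes ++ ["break"]
      else if prev = "comment" ∧ status = "percent" then modes ++ ["break"]
      else if prev = "comment" ∧ status = "comment" then modes ++ ["comment"]
      else if status = "comment" then modes ++ ["comment"]
      else modes) = modes ++ [pvTransition prev status] := by
  rcases hp with h | h | h <;> rcases hs with h' | h' | h' <;> subst h <;> subst h' <;> simp [pvTransition]

-- definitional cons-step equation of A's loop, with the inlined classification named
lemma pvLoopA_cons (line : String) (rest nl md : List String) (prev : String) :
    pvLoopA (line :: rest) nl md prev =
      pvLoopA rest (nl ++ [(pvClassify line).1])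
        (if prev = "start" then md
          else if prev = "normal" then md ++ ["space"]
          else if prev = "percent" then md ++ ["nospace"]
          else if prev = "comment" ∧ (pvClassify line).2 = "normal" then md ++ ["break"]
          else if prev = "comment" ∧ (pvClassify line).2 = "percent" then md ++ ["break"]
          else if prev = "comment" ∧ (pvClassify line).2 = "comment" then md ++ ["comment"]
          else if (pvClassify line).2 = "comment" then md ++ ["comment"]
          else md) (pvClassify line).2 := rfl

-- Loop invariant: once prev_status is a real status, the loop appends the classified
-- lines and the pairwise transitions of (prev :: statuses).
lemma pvLoopA_inv (lines : List String) :
    ∀ (new_lines modes : List String) (prev : String),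
      prev = "comment" ∨ prev = "percent" ∨ prev = "normal" →
      pvLoopA lines new_lines modes prev =
        (new_lines ++ (lines.map pvClassify).map Prod.fst,
         modes ++ (((prev :: (lines.map pvClassify).map Prod.snd).zip
                      ((lines.map pvClassify).map Prod.snd)).map
                      (fun p => pvTransition p.1 p.2)) ++ ["break"]) := by
  induction lines with
  | nil => intro nl md prev _; simp [pvLoopA]
  | cons line rest ih =>
    intro nl md prev hp
    have hprev_ne : prev ≠ "start" := by rcases hp with h | h | h <;> subst h <;> decide
    have hs := pvClassify_snd line
    rw [pvLoopA_cons]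
    rw [pvMatch_eq_transition prev (pvClassify line).2 hp hs md]
    rw [ih _ _ _ hs]
    simp

theorem process_modes_py_spec_aux (lines : List String) :
    process_modes_py lines = process_modes_py_alt lines := by
  cases lines with
  | nil => rfl
  | cons line rest =>
    have hs := pvClassify_snd line
    show pvLoopA (line :: rest) [] [] "start" = _
    rw [pvLoopA_cons]
    simp only [List.nil_append, reduceIte]
    rw [pvLoopA_inv rest _ _ _ hs]
    simp [process_modes_py_alt]

-- ===== VERDICT (by name: the statement is the Claim_ definition above) =====
theorem process_modes_py_spec : Claim_equal_process_modes_py := by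
  intro lines _
  exact process_modes_py_spec_aux lines
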